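-- pv_equiv track=rewrite | github.com/AsranCo/Sample | Quera-College/F4_recomendMuz.py | query_age_artist
-- ===== SOURCE A (Python) =====
-- def query_age_artist(age, artist_name, all_users, all_albums):
--     counter = 0
--     albums_name = []
--
--     for use in all_users.keys():
--         if age in use:
--             albums_name.append(all_users[use])
--
--     for alb in range(len(albums_name)):
--         for albums in albums_name[alb]:
--             for use in all_albums.keys():
--                 if artist_name in use and albums in use:
--                     counter = counter + all_albums[use]
--     return counter
-- ===== SOURCE B (Python) =====
-- def query_age_artist(age, artist_name, all_users, all_albums):
--     # Aggregate the album-name multiplicities of age-matching users into a counter,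
--     # then loop over the album table once, multiplying each artist-matching entry's
--     # play-count by the number of matching requested names.
--     freq = {}
--     for user, albums in all_users.items():
--         if age in user:
--             for name in albums:
--                 freq[name] = freq.get(name, 0) + 1
--     total = 0
--     for key, cnt in all_albums.items():
--         if artist_name in key:
--             total += cnt * sum(m for name, m in freq.items() if name in key)
--     return total
-- ===== Notes on version B (the rewrite author's own statement) =====
-- stated objective: alternative
-- what changed: Instead of A's append/index triple loop over per-user album lists rescanning the whole album dict per name, B aggregates the requested album names into a multiplicity counter, inverts the loop nesting (album table outermost), and for each artist-matching entry adds play-count times the number of matching names.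
import Mathlib
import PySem

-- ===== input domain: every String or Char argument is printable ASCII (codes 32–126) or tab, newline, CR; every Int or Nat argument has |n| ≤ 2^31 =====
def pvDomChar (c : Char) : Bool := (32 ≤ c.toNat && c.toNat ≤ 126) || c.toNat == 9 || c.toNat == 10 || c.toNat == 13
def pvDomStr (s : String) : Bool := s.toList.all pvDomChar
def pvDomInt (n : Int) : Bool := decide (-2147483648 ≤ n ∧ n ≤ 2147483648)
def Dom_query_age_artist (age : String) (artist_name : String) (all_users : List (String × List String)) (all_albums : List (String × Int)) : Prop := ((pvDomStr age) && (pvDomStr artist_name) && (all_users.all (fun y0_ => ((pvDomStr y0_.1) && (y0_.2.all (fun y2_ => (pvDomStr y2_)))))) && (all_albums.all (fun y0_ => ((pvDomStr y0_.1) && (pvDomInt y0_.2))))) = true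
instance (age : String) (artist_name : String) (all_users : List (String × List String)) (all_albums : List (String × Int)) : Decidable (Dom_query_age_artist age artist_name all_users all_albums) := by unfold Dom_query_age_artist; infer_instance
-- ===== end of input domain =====

-- B replaces A's append-then-index triple loop (which rescans the whole album table for every
-- requested album name) by a different algorithm: it aggregates the age-matching users' album
-- names into a multiplicity counter, inverts the loop nesting (album table outermost), and adds
-- play-count × number-of-matching-names per artist-matching entry. Objective: alternative.

-- ===== PORT A =====
-- d[k] on the association list representing a Python dict (first match)
def pvUsersGet (d : List (String × List String)) (k : String) : List String :=
  ((d.find? (fun p => p.1 == k)).map (fun p => p.2)).getD []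
def pvAlbumsGet (d : List (String × Int)) (k : String) : Int :=
  ((d.find? (fun p => p.1 == k)).map (fun p => p.2)).getD 0

def query_age_artist (age : String) (artist_name : String) (all_users : List (String × List String)) (all_albums : List (String × Int)) : Int :=
  let albums_name : List (List String) :=
    all_users.foldl (fun acc p =>
      if PySem.Str.isIn age p.1 then acc ++ [pvUsersGet all_users p.1] else acc) []
  (PySem.List.pyRange 0 (albums_name.length : Int) 1).foldl (fun counter alb =>
    (PySem.List.pyGetD albums_name alb []).foldl (fun counter albums =>
      all_albums.foldl (fun counter p =>
        if PySem.Str.isIn artist_name p.1 && PySem.Str.isIn albums p.1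
        then counter + pvAlbumsGet all_albums p.1 else counter) counter) counter) 0

-- ===== PORT B =====
def query_age_artist_alt (age : String) (artist_name : String) (all_users : List (String × List String)) (all_albums : List (String × Int)) : Int :=
  let freq : PySem.Dict String Int :=
    all_users.foldl (fun d p =>
      if PySem.Str.isIn age p.1 then
        p.2.foldl (fun d name => d.insert name (d.getD name 0 + 1)) d
      else d) PySem.Dict.empty
  all_albums.foldl (fun total e =>
    if PySem.Str.isIn artist_name e.1 then
      total + e.2 * ((freq.items.filter (fun q => PySem.Str.isIn q.1 e.1)).map (fun q => q.2)).sum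
    else total) 0

-- ===== PRECONDITION & SPEC =====
-- The association lists stand for Python dicts, whose keys are unique; Pre_ only requires that
-- (duplicate keys have no Python-dict counterpart), so it excludes no input Python A returns on.
def Pre_query_age_artist (age : String) (artist_name : String) (all_users : List (String × List String)) (all_albums : List (String × Int)) : Prop :=
  (all_users.map Prod.fst).Nodup ∧ (all_albums.map Prod.fst).Nodup
instance (age : String) (artist_name : String) (all_users : List (String × List String)) (all_albums : List (String × Int)) : Decidable (Pre_query_age_artist age artist_name all_users all_albums) := by unfold Pre_query_age_artist; infer_instance
def pvWitness_query_age_artist : String × String × (List (String × List String)) × (List (String × Int)) :=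
  ("2", "x", [("u2", ["a"])], [("xa", 3)])
def Spec_query_age_artist (age : String) (artist_name : String) (all_users : List (String × List String)) (all_albums : List (String × Int)) (out : Int) : Prop := out = query_age_artist_alt age artist_name all_users all_albums
instance (age : String) (artist_name : String) (all_users : List (String × List String)) (all_albums : List (String × Int)) (out : Int) : Decidable (Spec_query_age_artist age artist_name all_users all_albums out) := by unfold Spec_query_age_artist; infer_instance

-- ===== CLAIM (what is proved, stated in full; the proofs are below) =====
def Claim_equal_query_age_artist : Prop := ∀ (age : String) (artist_name : String) (all_users : List (String × List String)) (all_albums : List (String × Int)), Dom_query_age_artist age artist_name all_users all_albums → Pre_query_age_artist age artist_name all_users all_albums → Spec_query_age_artist age artist_name all_users all_albums (query_age_artist age artist_name all_users all_albums)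

-- ===== LEMMAS AND PROOFS =====

-- the age-matching users' album names, in order, with multiplicity
def pvTargets (age : String) (all_users : List (String × List String)) : List String :=
  (all_users.filter (fun p => PySem.Str.isIn age p.1)).flatMap (fun p => p.2)

-- first-match lookup of a key of p returns p itself when keys are unique
theorem pvFind_self {α : Type} {l : List (String × α)} (h : (l.map Prod.fst).Nodup)
    {p : String × α} (hp : p ∈ l) : l.find? (fun q => q.1 == p.1) = some p := by
  induction l with
  | nil => cases hp
  | cons a t ih =>
    simp only [List.map_cons, List.nodup_cons] at h
    rcases List.mem_cons.mp hp with rfl | hpt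
    · simp [List.find?]
    · have hne : (a.1 == p.1) = false := by
        simp only [beq_eq_false_iff_ne]
        intro he
        exact h.1 (he ▸ List.mem_map.mpr ⟨p, hpt, rfl⟩)
      simp [List.find?, hne, ih h.2 hpt]

theorem pvFoldl_nested {α : Type} (L : List (List α)) (f : Int → α → Int) (a : Int) :
    L.foldl (List.foldl f) a = L.flatten.foldl f a := by
  induction L generalizing a with
  | nil => rfl
  | cons x t ih => simp [List.foldl_append, ih]

theorem pvFoldl_add_sum {α : Type} (l : List α) (g : α → List Int) (a : Int) :
    l.foldl (fun c x => c + (g x).sum) a = a + (l.flatMap g).sum := by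
  induction l generalizing a with
  | nil => simp
  | cons x t ih => simp [ih, add_assoc]

-- A equals the flat sum over the requested names of the matching artist entries' counts
theorem pvA_eq (age artist_name : String) (all_users : List (String × List String))
    (all_albums : List (String × Int)) (hpre : Pre_query_age_artist age artist_name all_users all_albums) :
    query_age_artist age artist_name all_users all_albums
      = ((pvTargets age all_users).flatMap (fun name =>
          (((all_albums.filter (fun q => PySem.Str.isIn artist_name q.1)).filter
            (fun q => PySem.Str.isIn name q.1)).map (fun q => q.2)))).sum := by
  unfold query_age_artist pvTargets
  obtain ⟨hu, ha⟩ := hpre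
  rw [PySem.List.foldl_append_if]
  rw [List.map_congr_left (fun p hp => by
    have := pvFind_self hu (List.mem_of_mem_filter hp)
    simp [pvUsersGet, this] : ∀ p ∈ all_users.filter (fun p => PySem.Str.isIn age p.1),
      pvUsersGet all_users p.1 = p.2)]
  rw [List.nil_append, PySem.List.foldl_pyRange_zero_pyGetD', pvFoldl_nested]
  have hstep : ∀ (c : Int) (albums : String),
      all_albums.foldl (fun counter p =>
        if PySem.Str.isIn artist_name p.1 && PySem.Str.isIn albums p.1
        then counter + pvAlbumsGet all_albums p.1 else counter) c
      = c + (((all_albums.filter (fun q => PySem.Str.isIn artist_name q.1)).filter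
          (fun q => PySem.Str.isIn albums q.1)).map (fun q => q.2)).sum := by
    intro c albums
    have hinner : ∀ (c : Int) (p : String × Int), p ∈ all_albums →
        (if PySem.Str.isIn artist_name p.1 && PySem.Str.isIn albums p.1
         then c + pvAlbumsGet all_albums p.1 else c)
        = (if PySem.Str.isIn artist_name p.1 && PySem.Str.isIn albums p.1
           then c + p.2 else c) := by
      intro c p hp
      by_cases hc : (PySem.Str.isIn artist_name p.1 && PySem.Str.isIn albums p.1) = true
      · rw [if_pos hc, if_pos hc]
        simp [pvAlbumsGet, pvFind_self ha hp]
      · rw [if_neg hc, if_neg hc]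
    refine (PySem.List.foldl_congr_mem all_albums _
        (fun counter (p : String × Int) =>
          if PySem.Str.isIn artist_name p.1 && PySem.Str.isIn albums p.1
          then counter + p.2 else counter) c hinner).trans ?_
    rw [PySem.List.foldl_if_eq_foldl_filter,
        List.filter_filter, PySem.List.foldl_add _ (fun q : String × Int => q.2)]
    congr 3
    apply List.filter_congr
    intro q _
    exact Bool.and_comm _ _
  simp only [hstep]
  rw [pvFoldl_add_sum]
  simp [List.flatMap_def]

-- B's counting loop over users builds exactly Counter(targets)
theorem pvFreq_eq (age : String) (all_users : List (String × List String)) :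
    all_users.foldl (fun d p =>
      if PySem.Str.isIn age p.1 then
        p.2.foldl (fun d name => d.insert name (d.getD name 0 + 1)) d
      else d) PySem.Dict.empty
    = PySem.Dict.counter (pvTargets age all_users) := by
  rw [← PySem.Dict.foldl_insert_getD_add_one_eq_counter]
  unfold pvTargets
  generalize (PySem.Dict.empty : PySem.Dict String Int) = d
  induction all_users generalizing d with
  | nil => rfl
  | cons a t ih =>
    rw [List.foldl_cons]
    by_cases hc : PySem.Str.isIn age a.1 = true
    · rw [if_pos hc]
      simp only [List.filter_cons, hc, if_true, List.flatMap_cons, List.foldl_append]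
      exact ih _
    · rw [if_neg hc]
      simp only [List.filter_cons, hc, if_false, Bool.false_eq_true]
      exact ih _

-- filtered value-sum of a counter = countP of the counted list, as an Int
theorem pvCounter_sum (xs : List String) (key : String) :
    (((PySem.Dict.counter xs).items.filter (fun q => PySem.Str.isIn q.1 key)).map (fun q => q.2)).sum
      = (xs.countP (fun t => PySem.Str.isIn t key) : Int) := by
  set p : String → Bool := fun t => PySem.Str.isIn t key with hp
  rw [PySem.Dict.items_counter]
  have hperm : (PySem.Set.ofList xs).Perm xs.dedup :=
    (List.perm_ext_iff_of_nodup (PySem.Set.nodup_ofList xs) (List.nodup_dedup xs)).mpr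
      (fun a => by rw [PySem.Set.mem_ofList, List.mem_dedup])
  rw [List.filter_map, List.map_map]
  calc ((((PySem.Set.ofList xs).filter ((fun q => PySem.Str.isIn q.1 key) ∘ fun k => (k, (xs.count k : Int)))).map
          ((fun q : String × Int => q.2) ∘ fun k => (k, (xs.count k : Int)))).sum)
      = (((xs.dedup.filter p).map (fun k => (xs.count k : Int)))).sum :=
        ((hperm.filter _).map _).sum_eq
    _ = (xs.countP p : Int) := by
        rw [show (fun k => ((xs.count k : Nat) : Int)) = (Nat.cast ∘ fun k => xs.count k) from rfl,
            ← List.map_map, ← Nat.cast_list_sum, List.sum_map_count_dedup_filter_eq_countP]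

theorem pvSum_filter_map {α : Type} (l : List α) (p : α → Bool) (f : α → Int) :
    ((l.filter p).map f).sum = (l.map (fun x => if p x then f x else 0)).sum := by
  induction l with
  | nil => rfl
  | cons a t ih =>
    by_cases hc : p a = true
    · simp [hc, ih]
    · simp [hc, ih]

theorem pvSum_swap {α β : Type} (A : List α) (B : List β) (g : α → β → Int) :
    (A.map (fun a => (B.map (g a)).sum)).sum
      = (B.map (fun b => (A.map (fun a => g a b)).sum)).sum := by
  induction A with
  | nil => simp
  | cons a t ih =>
    simp only [List.map_cons, List.sum_cons, ih]
    rw [← List.sum_map_add]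

-- ===== VERDICT (by name: the statement is the Claim_ definition above) =====
theorem query_age_artist_spec : Claim_equal_query_age_artist := by
  intro age artist_name all_users all_albums _ hpre
  unfold Spec_query_age_artist
  rw [pvA_eq age artist_name all_users all_albums hpre]
  unfold query_age_artist_alt
  rw [pvFreq_eq,
      PySem.List.foldl_if_eq_foldl_filter
        (fun e : String × Int => PySem.Str.isIn artist_name e.1)
        (fun total e => total + e.2 * (((PySem.Dict.counter (pvTargets age all_users)).items.filter
          (fun q => PySem.Str.isIn q.1 e.1)).map (fun q => q.2)).sum),
      PySem.List.foldl_add, zero_add]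
  simp only [pvCounter_sum]
  rw [List.flatMap_def, List.sum_flatten]  -- flat sum = sum of per-name sums
  rw [List.map_map]
  have h2 : ∀ e : String × Int, e ∈ all_albums.filter (fun q => PySem.Str.isIn artist_name q.1) →
      e.2 * ((pvTargets age all_users).countP (fun t => PySem.Str.isIn t e.1) : Int)
        = ((pvTargets age all_users).map (fun t => if PySem.Str.isIn t e.1 then e.2 else 0)).sum := by
    intro e _
    rw [← PySem.List.sum_map_ite_one_zero (fun t => PySem.Str.isIn t e.1), ← List.sum_map_mul_left]
    congr 1
    apply List.map_congr_left
    intro t _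
    by_cases hc : PySem.Str.isIn t e.1 = true
    · rw [if_pos hc, if_pos hc, mul_one]
    · rw [if_neg hc, if_neg hc, mul_zero]
  rw [List.map_congr_left h2]
  rw [← pvSum_swap]
  congr 1
  apply List.map_congr_left
  intro name _
  rw [Function.comp_apply, pvSum_filter_map]
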